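-- pv_equiv track=rewrite | github.com/linuxboot/heads | blobs/t480/deguard/lib/cfg.py | optToStr
-- ===== SOURCE A (Python) =====
-- def optToStr(opt):
-- 	assert opt & 0xFFF0 == 0
-- 	optStr = "?!MF"
-- 	ret = ""
-- 	for i in range(4):
-- 		if opt & (8 >> i):
-- 			ret += optStr[i]
-- 		else:
-- 			ret += "-"
-- 	return ret
-- ===== SOURCE B (Python) =====
-- _TABLE = [
--     "----", "---F", "--M-", "--MF",
--     "-!--", "-!-F", "-!M-", "-!MF",
--     "?---", "?--F", "?-M-", "?-MF",
--     "?!--", "?!-F", "?!M-", "?!MF",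
-- ]
--
-- def optToStr(opt):
--     assert opt & 0xFFF0 == 0
--     return _TABLE[opt & 0xF]
-- ===== Notes on version B (the rewrite author's own statement) =====
-- stated objective: idiomatic
-- what changed: Replaces the per-bit loop that concatenates one character per flag with a single lookup into a literal 16-entry table indexed by the low four bits.
import Mathlib
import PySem

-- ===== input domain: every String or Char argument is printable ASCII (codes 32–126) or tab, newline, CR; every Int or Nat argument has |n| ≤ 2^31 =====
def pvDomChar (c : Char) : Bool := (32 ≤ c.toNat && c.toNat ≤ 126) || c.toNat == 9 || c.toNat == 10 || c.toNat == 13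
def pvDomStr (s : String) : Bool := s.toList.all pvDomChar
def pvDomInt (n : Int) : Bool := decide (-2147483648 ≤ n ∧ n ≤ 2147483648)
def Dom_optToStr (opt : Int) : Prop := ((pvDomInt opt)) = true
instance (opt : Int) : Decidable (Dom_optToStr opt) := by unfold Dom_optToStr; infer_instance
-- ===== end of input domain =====

-- B replaces A's per-bit loop with a single lookup in a literal 16-entry table (idiomatic, not faster).

-- ===== PORT A =====
-- Python's `8 >> i` is core Lean's `>>>` with a Nat shift; i comes from range(4) so i ≥ 0 and
-- `i.toNat` is exact. `optStr[i]` is PySem.Str.pyGet?; i < 4 = len(optStr) so the getD default is never used.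
def optToStr (opt : Int) : String :=
  let optStr : String := "?!MF"
  (PySem.List.pyRange 0 4 1).foldl
    (fun ret i =>
      if PySem.Int.band opt ((8 : Int) >>> i.toNat) ≠ 0 then
        ret ++ String.ofList [(PySem.Str.pyGet? optStr i).getD ' ']
      else
        ret ++ "-")
    ""

-- ===== PORT B =====
def optToStrTable : List String :=
  ["----", "---F", "--M-", "--MF",
   "-!--", "-!-F", "-!M-", "-!MF",
   "?---", "?--F", "?-M-", "?-MF",
   "?!--", "?!-F", "?!M-", "?!MF"]

-- _TABLE[opt & 0xF]: the index is in [0,16) for every Int opt, so the getD default is never used.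
def optToStr_alt (opt : Int) : String :=
  (PySem.List.pyGet? optToStrTable (PySem.Int.band opt 15)).getD ""

-- ===== PRECONDITION & SPEC =====
-- Pre_ is exactly the assert: A (and B) raise AssertionError when opt & 0xFFF0 ≠ 0.
def Pre_optToStr (opt : Int) : Prop := PySem.Int.band opt 65520 = 0
instance (opt : Int) : Decidable (Pre_optToStr opt) := by unfold Pre_optToStr; infer_instance
def pvWitness_optToStr : Int := (5)
def Spec_optToStr (opt : Int) (out : String) : Prop := out = optToStr_alt opt
instance (opt : Int) (out : String) : Decidable (Spec_optToStr opt out) := by unfold Spec_optToStr; infer_instance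

-- ===== CLAIM (what is proved, stated in full; the proofs are below) =====
def Claim_equal_optToStr : Prop := ∀ (opt : Int), Dom_optToStr opt → Pre_optToStr opt → Spec_optToStr opt (optToStr opt)

-- ===== LEMMAS AND PROOFS =====

-- Masking by a low bit commutes with first masking by 15 (Nat version).
theorem nat_mask_low (n c : Nat) (hc : c = 1 ∨ c = 2 ∨ c = 4 ∨ c = 8) :
    n &&& c = (n &&& 15) &&& c := by
  rw [Nat.land_assoc]
  rcases hc with rfl | rfl | rfl | rfl <;> rfl

theorem nat_mask_low_neg (k c : Nat) (hc : c = 1 ∨ c = 2 ∨ c = 4 ∨ c = 8) :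
    c - (c &&& k) = (15 - (15 &&& k)) &&& c := by
  have hck : c &&& k = c &&& (15 &&& k) := by
    conv_lhs => rw [show c = c &&& 15 by rcases hc with rfl | rfl | rfl | rfl <;> rfl]
    rw [Nat.land_assoc]
  rw [hck]
  have h15 : 15 &&& k ≤ 15 := Nat.and_le_left
  rcases hc with rfl | rfl | rfl | rfl <;> interval_cases (15 &&& k) <;> rfl

-- band with a negative left argument and a Nat right argument, evaluated.
theorem band_neg_left (a : Int) (ha : ¬ 0 ≤ a) (b : Nat) :
    PySem.Int.band a (b : Int) = ((b - (b &&& (-a-1).toNat) : Nat) : Int) := by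
  simp only [PySem.Int.band, if_neg ha, if_pos (Int.natCast_nonneg b), Int.toNat_natCast]

-- Masking an Int by 1/2/4/8 sees only the low four bits.
theorem band_mask_low (a c : Int) (hc : c = 1 ∨ c = 2 ∨ c = 4 ∨ c = 8) :
    PySem.Int.band a c = PySem.Int.band (PySem.Int.band a 15) c := by
  have hcn : ∃ cn : Nat, c = (cn : Int) ∧ (cn = 1 ∨ cn = 2 ∨ cn = 4 ∨ cn = 8) := by
    rcases hc with rfl | rfl | rfl | rfl
    · exact ⟨1, rfl, Or.inl rfl⟩
    · exact ⟨2, rfl, Or.inr (Or.inl rfl)⟩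
    · exact ⟨4, rfl, Or.inr (Or.inr (Or.inl rfl))⟩
    · exact ⟨8, rfl, Or.inr (Or.inr (Or.inr rfl))⟩
  obtain ⟨cn, rfl, hcn⟩ := hcn
  by_cases ha : 0 ≤ a
  · obtain ⟨n, rfl⟩ := Int.eq_ofNat_of_zero_le ha
    rw [show ((15 : Int)) = ((15 : Nat) : Int) from rfl,
        PySem.Int.band_natCast, PySem.Int.band_natCast, PySem.Int.band_natCast]
    exact_mod_cast nat_mask_low n cn hcn
  · -- a < 0: evaluate band's negative-left branch on both sides
    have e15 : PySem.Int.band a 15 = ((15 - (15 &&& (-a-1).toNat) : Nat) : Int) := by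
      rw [show (15:Int) = ((15:Nat):Int) from rfl, band_neg_left a ha 15]
    have ecn : PySem.Int.band a ((cn : Nat) : Int) = ((cn - (cn &&& (-a-1).toNat) : Nat) : Int) :=
      band_neg_left a ha cn
    rw [ecn, e15, PySem.Int.band_natCast]
    exact_mod_cast nat_mask_low_neg (-a-1).toNat cn hcn

-- band a 15 is always in [0, 16)
theorem band15_bounds (a : Int) : 0 ≤ PySem.Int.band a 15 ∧ PySem.Int.band a 15 < 16 := by
  by_cases ha : 0 ≤ a
  · obtain ⟨n, rfl⟩ := Int.eq_ofNat_of_zero_le ha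
    rw [show ((15 : Int)) = ((15 : Nat) : Int) from rfl, PySem.Int.band_natCast]
    have : n &&& 15 ≤ 15 := Nat.and_le_right
    omega
  · simp only [PySem.Int.band, if_neg ha, if_pos (by norm_num : (0:Int) ≤ 15)]
    have : (15:Int).toNat - ((15:Int).toNat &&& (-a-1).toNat) ≤ 15 := by omega
    omega

-- A's result depends only on the low four bits of opt.
theorem optToStr_band15 (opt : Int) : optToStr opt = optToStr (PySem.Int.band opt 15) := by
  simp only [optToStr]
  rw [show PySem.List.pyRange 0 4 1 = [(0:Int),1,2,3] from rfl]
  simp only [List.foldl]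
  rw [show (8:Int) >>> ((Int.toNat (0:Int) : Nat) : Int) = 8 by decide,
      show (8:Int) >>> ((Int.toNat (1:Int) : Nat) : Int) = 4 by decide,
      show (8:Int) >>> ((Int.toNat (2:Int) : Nat) : Int) = 2 by decide,
      show (8:Int) >>> ((Int.toNat (3:Int) : Nat) : Int) = 1 by decide]
  rw [band_mask_low opt 8 (by norm_num), band_mask_low opt 4 (by norm_num),
      band_mask_low opt 2 (by norm_num), band_mask_low opt 1 (by norm_num)]

-- ===== VERDICT (by name: the statement is the Claim_ definition above) =====
theorem optToStr_spec : Claim_equal_optToStr := by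
  intro opt _ _
  unfold Spec_optToStr optToStr_alt
  rw [optToStr_band15 opt]
  obtain ⟨h0, h16⟩ := band15_bounds opt
  generalize h : PySem.Int.band opt 15 = m at h0 h16 ⊢
  interval_cases m <;> decide
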